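-- pv_equiv track=rewrite | github.com/EvoTrack1/EvoTrack | rootanalysis.py | find_entry_nodes
-- ===== SOURCE A (Python) =====
-- from collections import deque
--
-- def find_entry_nodes(edges, alarm_node):
--     parent_map = {}
--     for edge in edges:
--         u, v = edge
--         if v not in parent_map:
--             parent_map[v] = set()
--         parent_map[v].add(u)
--
--     visited = set()
--     queue = deque([(alarm_node, 0)])
--     visited.add(alarm_node)
--     entry_nodes = set()
--     entry_nodes_depth = {}
--
--     while queue:
--         node, depth= queue.popleft()
--         if node not in parent_map or not parent_map[node]:
--             entry_nodes.add(node)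
--             if depth not in entry_nodes_depth:
--                 entry_nodes_depth[depth] = 1
--             else:
--                 entry_nodes_depth[depth] = entry_nodes_depth[depth] + 1
--         else:
--             for parent in parent_map[node]:
--                 if parent not in visited:
--                     visited.add(parent)
--                     queue.append((parent, depth+1))
--
--     return entry_nodes
-- ===== SOURCE B (Python) =====
-- def find_entry_nodes(edges, alarm_node):
--     # Level-by-level backward search scanning the raw edge list each round
--     # (no parent map, no deque, no depth bookkeeping), then a staged filter
--     # keeping the reached nodes that never appear as an edge target.
--     visited = [alarm_node]
--     frontier = [alarm_node]
--     while frontier: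
--         nxt = []
--         for node in frontier:
--             for u, v in edges:
--                 if v == node and u not in visited:
--                     visited.append(u)
--                     nxt.append(u)
--         frontier = nxt
--     targets = {v for _, v in edges}
--     return {n for n in visited if n not in targets}
-- ===== Notes on version B (the rewrite author's own statement) =====
-- stated objective: alternative
-- what changed: A indexes the edges into a dict-of-sets parent map and runs a deque BFS that detects entry nodes (and counts per-depth entries) while dequeuing; B builds no adjacency structure at all: it expands the search level by level, rescanning the raw edge list for each frontier node, and afterwards filters the reached nodes through a set of edge targets.
import Mathlib
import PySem

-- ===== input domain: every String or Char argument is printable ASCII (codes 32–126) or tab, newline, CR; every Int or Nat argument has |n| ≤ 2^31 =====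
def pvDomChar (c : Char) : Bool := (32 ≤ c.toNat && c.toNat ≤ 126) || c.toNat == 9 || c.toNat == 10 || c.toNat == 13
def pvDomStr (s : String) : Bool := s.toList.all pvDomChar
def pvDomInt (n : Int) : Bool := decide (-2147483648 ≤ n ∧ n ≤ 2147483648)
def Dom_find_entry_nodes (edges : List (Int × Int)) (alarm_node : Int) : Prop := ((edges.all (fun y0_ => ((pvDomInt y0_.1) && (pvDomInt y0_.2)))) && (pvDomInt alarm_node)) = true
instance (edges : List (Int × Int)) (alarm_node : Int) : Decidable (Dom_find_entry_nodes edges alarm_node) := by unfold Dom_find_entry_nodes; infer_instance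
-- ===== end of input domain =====

-- B replaces A's parent-map + deque BFS with interleaved entry detection (and an unused depth
-- counter) by an index-free level-by-level expansion that rescans the raw edge list, followed by
-- a staged filter against the set of edge targets; not faster (O(V*E) vs O(V+E)), a different
-- strategy of similar size.

-- ===== PORT A =====
-- parent_map construction: `if v not in parent_map: parent_map[v] = set()` then `parent_map[v].add(u)`
def pvBuildPM (edges : List (Int × Int)) : PySem.Dict Int (PySem.Set Int) :=
  edges.foldl
    (fun pm e =>
      (if pm.contains e.2 then pm else pm.insert e.2 PySem.Set.empty).modify e.2 PySem.Set.empty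
        (fun s => PySem.Set.add s e.1))
    PySem.Dict.empty

-- the `while queue` loop; fuel 2*|edges|+1 bounds the number of dequeues (each dequeued node was
-- enqueued exactly once, guarded by `visited`)
def pvLoopA (pm : PySem.Dict Int (PySem.Set Int)) :
    Nat → List (Int × Int) → PySem.Set Int → PySem.Set Int → PySem.Dict Int Int → PySem.Set Int
  | 0, _, _, ent, _ => ent
  | _ + 1, [], _, ent, _ => ent
  | fuel + 1, (node, depth) :: rest, vis, ent, dd =>
    if !pm.contains node || (pm.getD node PySem.Set.empty).isEmpty then
      let ent' := PySem.Set.add ent node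
      let dd' := if !dd.contains depth then dd.insert depth 1 else dd.modify depth 0 (· + 1)
      pvLoopA pm fuel rest vis ent' dd'
    else
      let st := (pm.getD node PySem.Set.empty).foldl
        (fun (st : PySem.Set Int × List (Int × Int)) parent =>
          if st.1.contains parent then st
          else (PySem.Set.add st.1 parent, st.2 ++ [(parent, depth + 1)]))
        (vis, rest)
      pvLoopA pm fuel st.2 st.1 ent dd

def find_entry_nodes (edges : List (Int × Int)) (alarm_node : Int) : List Int :=
  let pm := pvBuildPM edges
  pvLoopA pm (2 * edges.length + 1) [(alarm_node, 0)]
    (PySem.Set.add PySem.Set.empty alarm_node) PySem.Set.empty PySem.Dict.empty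

-- ===== PORT B =====
-- inner loop: `for u, v in edges: if v == node and u not in visited: visited.append(u); nxt.append(u)`
-- (st = (visited, nxt); visited is a plain Python list in B)
def pvScanB (edges : List (Int × Int)) (node : Int) (st : List Int × List Int) :
    List Int × List Int :=
  edges.foldl
    (fun st e =>
      if e.2 == node && !st.1.contains e.1 then (st.1 ++ [e.1], st.2 ++ [e.1]) else st) st

-- the `while frontier` loop; fuel |edges|+2 bounds the number of rounds (each round but the last
-- two discovers at least one new node)
def pvLoopB2 (edges : List (Int × Int)) : Nat → List Int → List Int → List Int
  | 0, _, visited => visited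
  | _ + 1, [], visited => visited
  | fuel + 1, frontier, visited =>
    let st := frontier.foldl (fun st node => pvScanB edges node st) (visited, [])
    pvLoopB2 edges fuel st.2 st.1

def find_entry_nodes_alt (edges : List (Int × Int)) (alarm_node : Int) : List Int :=
  let visited := pvLoopB2 edges (edges.length + 2) [alarm_node] [alarm_node]
  let targets := PySem.Set.ofList (edges.map Prod.snd)   -- {v for _, v in edges}
  visited.filter (fun n => !targets.contains n)          -- {n for n in visited if n not in targets}

-- ===== PRECONDITION & SPEC =====
def Spec_find_entry_nodes (edges : List (Int × Int)) (alarm_node : Int) (out : List Int) : Prop := out = find_entry_nodes_alt edges alarm_node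
instance (edges : List (Int × Int)) (alarm_node : Int) (out : List Int) : Decidable (Spec_find_entry_nodes edges alarm_node out) := by unfold Spec_find_entry_nodes; infer_instance

-- ===== CLAIM (what is proved, stated in full; the proofs are below) =====
def Claim_equal_find_entry_nodes : Prop := ∀ (edges : List (Int × Int)) (alarm_node : Int), Dom_find_entry_nodes edges alarm_node → Spec_find_entry_nodes edges alarm_node (find_entry_nodes edges alarm_node)

-- ===== LEMMAS AND PROOFS =====

-- the sources of the edges targeting `node`, in edge order (with duplicates)
def pvRaw (edges : List (Int × Int)) (node : Int) : List Int :=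
  (edges.filter (fun e => e.2 == node)).map Prod.fst

-- first occurrences of elements of l not already in vis, in order
def pvFresh (vis : PySem.Set Int) : List Int → List Int
  | [] => []
  | p :: t => if PySem.Set.contains vis p then pvFresh vis t else p :: pvFresh (vis ++ [p]) t

-- everything one level of B discovers, starting from visited list vis
def pvDelta (edges : List (Int × Int)) : List Int → List Int → List Int
  | [], _ => []
  | n :: t, vis =>
    let F := pvFresh vis (pvRaw edges n)
    F ++ pvDelta edges t (vis ++ F)

lemma pvFresh_mem (l : List Int) : ∀ (vis : List Int) (x : Int),
    x ∈ pvFresh vis l → x ∈ l ∧ x ∉ vis := by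
  induction l with
  | nil => intro vis x h; simp [pvFresh] at h
  | cons p t ih =>
    intro vis x h
    simp only [pvFresh] at h
    split_ifs at h with hc
    · obtain ⟨h1, h2⟩ := ih vis x h
      exact ⟨List.mem_cons_of_mem _ h1, h2⟩
    · have hpv : p ∉ vis := fun hm => hc ((PySem.Set.contains_iff _ _).mpr hm)
      rcases List.mem_cons.mp h with rfl | h
      · exact ⟨List.mem_cons_self, hpv⟩
      · obtain ⟨h1, h2⟩ := ih (vis ++ [p]) x h
        exact ⟨List.mem_cons_of_mem _ h1, fun hx => h2 (List.mem_append_left _ hx)⟩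

lemma pvFresh_nodup (l : List Int) : ∀ (vis : List Int), (pvFresh vis l).Nodup := by
  induction l with
  | nil => intro vis; simp [pvFresh]
  | cons p t ih =>
    intro vis
    simp only [pvFresh]
    split_ifs with hc
    · exact ih vis
    · refine List.nodup_cons.mpr ⟨?_, ih (vis ++ [p])⟩
      intro hmem
      exact (pvFresh_mem t (vis ++ [p]) p hmem).2 (List.mem_append_right _ List.mem_cons_self)

lemma pvFresh_foldl_add (l : List Int) : ∀ (vis : PySem.Set Int),
    List.foldl PySem.Set.add vis l = vis ++ pvFresh vis l := by
  induction l with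
  | nil => intro vis; simp [pvFresh]
  | cons p t ih =>
    intro vis
    simp only [List.foldl_cons, pvFresh, PySem.Set.add]
    split_ifs with hc
    · exact ih vis
    · rw [ih (vis ++ [p])]
      simp

lemma pvFresh_idem (l : List Int) : ∀ (s vis : List Int),
    (∀ x ∈ s, x ∈ vis) → pvFresh vis (pvFresh s l) = pvFresh vis l := by
  induction l with
  | nil => intro s vis _; simp [pvFresh]
  | cons p t ih =>
    intro s vis hsv
    simp only [pvFresh]
    by_cases hcs : PySem.Set.contains s p = true
    · rw [if_pos hcs]
      have hpv : PySem.Set.contains vis p = true :=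
        (PySem.Set.contains_iff _ _).mpr (hsv p ((PySem.Set.contains_iff _ _).mp hcs))
      rw [if_pos hpv]
      exact ih s vis hsv
    · rw [if_neg hcs]
      simp only [pvFresh]
      by_cases hcv : PySem.Set.contains vis p = true
      · rw [if_pos hcv, if_pos hcv]
        exact ih (s ++ [p]) vis (fun x hx => by
          rcases List.mem_append.mp hx with hx | hx
          · exact hsv x hx
          · simp only [List.mem_singleton] at hx
            subst hx
            exact (PySem.Set.contains_iff _ _).mp hcv)
      · rw [if_neg hcv, if_neg hcv]
        congr 1
        exact ih (s ++ [p]) (vis ++ [p]) (fun x hx => by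
          rcases List.mem_append.mp hx with hx | hx
          · exact List.mem_append_left _ (hsv x hx)
          · exact List.mem_append_right _ hx)

-- A's expansion fold over a parent list
lemma pvExpandGen {β : Type} (g : Int → β) (l : List Int) : ∀ (vis : List Int) (q : List β),
    l.foldl
      (fun (st : PySem.Set Int × List β) p =>
        if st.1.contains p then st else (PySem.Set.add st.1 p, st.2 ++ [g p]))
      (vis, q)
    = (vis ++ pvFresh vis l, q ++ (pvFresh vis l).map g) := by
  induction l with
  | nil => intro vis q; simp [pvFresh]
  | cons p t ih =>
    intro vis q
    simp only [List.foldl_cons, pvFresh]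
    by_cases hc : PySem.Set.contains vis p = true
    · rw [if_pos hc, if_pos hc]
      exact ih vis q
    · rw [if_neg hc, if_neg hc]
      have hadd : PySem.Set.add vis p = vis ++ [p] := by
        simp only [PySem.Set.add]
        rw [if_neg hc]
      rw [hadd, ih (vis ++ [p]) (q ++ [g p])]
      simp

-- B's edge scan for one frontier node
lemma pvScanB_eq (edges : List (Int × Int)) (node : Int) : ∀ (vis nxt : List Int),
    pvScanB edges node (vis, nxt)
    = (vis ++ pvFresh vis (pvRaw edges node), nxt ++ pvFresh vis (pvRaw edges node)) := by
  induction edges with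
  | nil => intro vis nxt; simp [pvScanB, pvRaw, pvFresh]
  | cons e t ih =>
    intro vis nxt
    simp only [pvScanB, List.foldl_cons] at ih ⊢
    have hbr : PySem.Set.contains vis e.1 = vis.contains e.1 :=
      PySem.Set.contains_eq_listContains vis e.1
    by_cases hv : (e.2 == node) = true
    · have hraw : pvRaw (e :: t) node = e.1 :: pvRaw t node := by
        simp [pvRaw, hv]
      rw [hraw]
      simp only [pvFresh, hbr]
      by_cases hc : vis.contains e.1 = true
      · rw [if_pos hc]
        have hguard : (e.2 == node && !vis.contains e.1) = false := by
          rw [hv, hc]; rfl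
        rw [hguard]
        simp only [Bool.false_eq_true, if_false]
        exact ih vis nxt
      · rw [if_neg hc]
        have hguard : (e.2 == node && !vis.contains e.1) = true := by
          rw [hv, Bool.eq_false_iff.mpr hc]; rfl
        rw [hguard]
        simp only [if_true]
        rw [ih (vis ++ [e.1]) (nxt ++ [e.1])]
        simp
    · have hraw : pvRaw (e :: t) node = pvRaw t node := by
        simp [pvRaw, hv]
      have hguard : (e.2 == node && !vis.contains e.1) = false := by
        rw [Bool.eq_false_iff.mpr hv]; rfl
      rw [hraw, hguard]
      simp only [Bool.false_eq_true, if_false]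
      exact ih vis nxt

-- characterisation of A's parent map: effect of one build step on getD / contains
lemma pvStepD (d : PySem.Dict Int (PySem.Set Int)) (e : Int × Int) (node : Int) :
    ((if d.contains e.2 then d else d.insert e.2 PySem.Set.empty).modify e.2 PySem.Set.empty
        (fun s => PySem.Set.add s e.1)).getD node PySem.Set.empty
    = if node = e.2 then PySem.Set.add (d.getD e.2 PySem.Set.empty) e.1
      else d.getD node PySem.Set.empty := by
  by_cases hc : d.contains e.2 = true
  · rw [if_pos hc, PySem.Dict.getD_modify]
  · rw [if_neg hc, PySem.Dict.getD_modify]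
    by_cases hn : node = e.2
    · rw [if_pos hn, if_pos hn, PySem.Dict.getD_insert, if_pos rfl,
        PySem.Dict.getD_of_not_contains d _ (by simpa using hc)]
    · rw [if_neg hn, if_neg hn, PySem.Dict.getD_insert, if_neg hn]

lemma pvStepC (d : PySem.Dict Int (PySem.Set Int)) (e : Int × Int) (node : Int) :
    ((if d.contains e.2 then d else d.insert e.2 PySem.Set.empty).modify e.2 PySem.Set.empty
        (fun s => PySem.Set.add s e.1)).contains node
    = (node == e.2 || d.contains node) := by
  by_cases hc : d.contains e.2 = true
  · rw [if_pos hc, PySem.Dict.contains_modify]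
  · rw [if_neg hc, PySem.Dict.contains_modify, PySem.Dict.contains_insert]
    by_cases hn : (node == e.2) = true
    · rw [hn]; rfl
    · rw [Bool.eq_false_iff.mpr hn]; rfl

lemma pvBuild_gen : ∀ (l : List (Int × Int)) (d : PySem.Dict Int (PySem.Set Int)) (node : Int),
    ((l.foldl
        (fun pm e =>
          (if pm.contains e.2 then pm else pm.insert e.2 PySem.Set.empty).modify e.2
            PySem.Set.empty (fun s => PySem.Set.add s e.1)) d).getD node PySem.Set.empty
      = List.foldl PySem.Set.add (d.getD node PySem.Set.empty) (pvRaw l node))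
    ∧ ((l.foldl
        (fun pm e =>
          (if pm.contains e.2 then pm else pm.insert e.2 PySem.Set.empty).modify e.2
            PySem.Set.empty (fun s => PySem.Set.add s e.1)) d).contains node
      = (d.contains node || !(pvRaw l node).isEmpty)) := by
  intro l
  induction l with
  | nil => intro d node; simp [pvRaw]
  | cons e t ih =>
    intro d node
    simp only [List.foldl_cons]
    obtain ⟨ihD, ihC⟩ := ih
      ((if d.contains e.2 then d else d.insert e.2 PySem.Set.empty).modify e.2 PySem.Set.empty
        (fun s => PySem.Set.add s e.1)) node
    by_cases he : e.2 = node
    · have hraw : pvRaw (e :: t) node = e.1 :: pvRaw t node := by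
        simp [pvRaw, he]
      constructor
      · rw [ihD, pvStepD, if_pos he.symm, hraw, List.foldl_cons, he]
      · rw [ihC, pvStepC, hraw]
        have : (node == e.2) = true := by simp [he]
        rw [this]
        simp
    · have hraw : pvRaw (e :: t) node = pvRaw t node := by
        simp [pvRaw, he]
      constructor
      · rw [ihD, pvStepD, if_neg (fun h => he (Eq.symm h)), hraw]
      · rw [ihC, pvStepC, hraw]
        have : (node == e.2) = false := beq_eq_false_iff_ne.mpr (fun h => he (Eq.symm h))
        rw [this]
        simp

lemma pvBuildPM_getD (edges : List (Int × Int)) (node : Int) :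
    (pvBuildPM edges).getD node PySem.Set.empty = pvFresh [] (pvRaw edges node) := by
  have h := (pvBuild_gen edges PySem.Dict.empty node).1
  rw [pvBuildPM, h, PySem.Dict.getD_empty, pvFresh_foldl_add]
  rfl

lemma pvBuildPM_contains (edges : List (Int × Int)) (node : Int) :
    (pvBuildPM edges).contains node = !(pvRaw edges node).isEmpty := by
  have h := (pvBuild_gen edges PySem.Dict.empty node).2
  rw [pvBuildPM, h, PySem.Dict.contains_empty, Bool.false_or]

-- the depth-counter dict never influences A's result
lemma pvLoopA_dd (pm : PySem.Dict Int (PySem.Set Int)) : ∀ (fuel : Nat)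
    (q : List (Int × Int)) (vis ent : PySem.Set Int) (dd dd' : PySem.Dict Int Int),
    pvLoopA pm fuel q vis ent dd = pvLoopA pm fuel q vis ent dd' := by
  intro fuel
  induction fuel with
  | zero => intro q vis ent dd dd'; rfl
  | succ f ih =>
    intro q vis ent dd dd'
    cases q with
    | nil => rfl
    | cons hd rest =>
      obtain ⟨node, depth⟩ := hd
      simp only [pvLoopA]
      by_cases h : (!pm.contains node || (pm.getD node PySem.Set.empty).isEmpty) = true
      · rw [if_pos h, if_pos h]
        exact ih rest vis _ _ _
      · rw [if_neg h, if_neg h]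
        exact ih _ _ ent _ _

-- one level of B's fold, split off from the visited list
lemma pvLevelSt (edges : List (Int × Int)) : ∀ (fr vis nxt : List Int),
    fr.foldl (fun st node => pvScanB edges node st) (vis, nxt)
    = (vis ++ pvDelta edges fr vis, nxt ++ pvDelta edges fr vis) := by
  intro fr
  induction fr with
  | nil => intro vis nxt; simp [pvDelta]
  | cons n t ih =>
    intro vis nxt
    simp only [List.foldl_cons, pvScanB_eq, pvDelta]
    rw [ih (vis ++ pvFresh vis (pvRaw edges n)) (nxt ++ pvFresh vis (pvRaw edges n))]
    simp

lemma pvDelta_mem (edges : List (Int × Int)) : ∀ (fr vis : List Int) (x : Int),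
    x ∈ pvDelta edges fr vis → x ∈ edges.map Prod.fst ∧ x ∉ vis := by
  intro fr
  induction fr with
  | nil => intro vis x h; simp [pvDelta] at h
  | cons n t ih =>
    intro vis x h
    simp only [pvDelta] at h
    rcases List.mem_append.mp h with h | h
    · obtain ⟨h1, h2⟩ := pvFresh_mem _ _ _ h
      refine ⟨?_, h2⟩
      simp only [pvRaw, List.mem_map, List.mem_filter] at h1
      obtain ⟨e, ⟨he, _⟩, rfl⟩ := h1
      exact List.mem_map_of_mem he
    · obtain ⟨h1, h2⟩ := ih (vis ++ pvFresh vis (pvRaw edges n)) x h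
      exact ⟨h1, fun hx => h2 (List.mem_append_left _ hx)⟩

lemma pvDelta_nodup (edges : List (Int × Int)) : ∀ (fr vis : List Int),
    (pvDelta edges fr vis).Nodup := by
  intro fr
  induction fr with
  | nil => intro vis; simp [pvDelta]
  | cons n t ih =>
    intro vis
    simp only [pvDelta]
    apply List.Nodup.append (pvFresh_nodup _ _) (ih _)
    intro a ha hb
    exact (pvDelta_mem edges t _ a hb).2 (List.mem_append_right _ ha)

-- removing one element from a distinct pool shortens it by one
lemma pvFilterNeLen (l : List Int) (f : Int) (h : l.Nodup) (hm : f ∈ l) :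
    (l.filter (fun u => !(u == f))).length + 1 = l.length := by
  have h1 : l.filter (fun u => !(u == f)) = l.erase f := by
    rw [h.erase_eq_filter]; simp [bne]
  rw [h1, List.length_erase_of_mem hm]
  have := List.length_pos_of_mem hm
  omega

-- counting: expanding the visited set by `fresh` removes exactly |fresh| from the unvisited pool
lemma pvCount (U : List Int) (hU : U.Nodup) :
    ∀ (fresh vis : List Int), fresh.Nodup → (∀ x ∈ fresh, x ∈ U) → (∀ x ∈ fresh, x ∉ vis) →
    (U.filter (fun u => !(vis ++ fresh).contains u)).length + fresh.length
      = (U.filter (fun u => !vis.contains u)).length := by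
  intro fresh
  induction fresh with
  | nil => intro vis _ _ _; simp
  | cons f t ih =>
    intro vis hnd hUm hdis
    obtain ⟨hft, hndt⟩ := List.nodup_cons.mp hnd
    have hf : f ∈ U := hUm f List.mem_cons_self
    have hfv : f ∉ vis := hdis f List.mem_cons_self
    have key : (U.filter (fun u => !(vis ++ [f]).contains u)).length + 1
        = (U.filter (fun u => !vis.contains u)).length := by
      have e1 : U.filter (fun u => !(vis ++ [f]).contains u)
          = (U.filter (fun u => !vis.contains u)).filter (fun u => !(u == f)) := by
        rw [List.filter_filter]
        apply List.filter_congr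
        intro x _
        by_cases hxf : x = f
        · subst hxf; simp [hfv]
        · simp [hxf]
      have e2 : f ∈ U.filter (fun u => !vis.contains u) := by
        simp [List.mem_filter, hf, hfv]
      rw [e1, pvFilterNeLen _ f (hU.filter _) e2]
    have step := ih (vis ++ [f]) hndt (fun x hx => hUm x (List.mem_cons_of_mem _ hx))
      (fun x hx => by
        simp only [List.mem_append, List.mem_singleton, not_or]
        exact ⟨hdis x (List.mem_cons_of_mem _ hx), fun e => hft (e ▸ hx)⟩)
    have assoc : vis ++ f :: t = (vis ++ [f]) ++ t := by simp
    rw [assoc]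
    simp only [List.length_cons]
    omega

-- one level: A dequeues the whole frontier, B folds its edge scan over it
lemma pvLevel (edges : List (Int × Int)) (d : Int) : ∀ (fr : List Int) (fa : Nat)
    (done nxt : List Int) (dd : PySem.Dict Int Int),
    (done ++ fr ++ nxt).Nodup →
    pvLoopA (pvBuildPM edges) (fr.length + fa)
        (fr.map (fun n => (n, d)) ++ nxt.map (fun n => (n, d + 1)))
        (done ++ fr ++ nxt)
        (done.filter (fun n => !(pvBuildPM edges).contains n)) dd
    = pvLoopA (pvBuildPM edges) fa
        ((fr.foldl (fun st node => pvScanB edges node st) (done ++ fr ++ nxt, nxt)).2.map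
          (fun n => (n, d + 1)))
        (fr.foldl (fun st node => pvScanB edges node st) (done ++ fr ++ nxt, nxt)).1
        ((done ++ fr).filter (fun n => !(pvBuildPM edges).contains n)) dd := by
  intro fr
  induction fr with
  | nil =>
    intro fa done nxt dd hnd
    simp
  | cons node rt ih =>
    intro fa done nxt dd hnd
    have hfl : (node :: rt).length + fa = (rt.length + fa) + 1 := by
      simp only [List.length_cons]
      omega
    rw [hfl]
    simp only [List.map_cons, List.cons_append, List.foldl_cons, pvLoopA]
    have hnode_done : node ∉ done := by
      intro hm
      have h1 := (List.nodup_append.mp hnd).1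
      exact (List.nodup_append.mp h1).2.2 node hm node List.mem_cons_self rfl
    by_cases hraw : pvRaw edges node = []
    · -- node has no incoming edge: A records an entry, B's edge scan finds nothing
      have hcont : (pvBuildPM edges).contains node = false := by
        rw [pvBuildPM_contains, hraw]
        rfl
      have hcondT :
          (!(pvBuildPM edges).contains node
            || ((pvBuildPM edges).getD node PySem.Set.empty).isEmpty) = true := by
        rw [hcont]
        rfl
      rw [if_pos hcondT]
      have hscan : pvScanB edges node (done ++ (node :: rt) ++ nxt, nxt)
          = (done ++ (node :: rt) ++ nxt, nxt) := by
        rw [pvScanB_eq, hraw]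
        simp [pvFresh]
      rw [hscan]
      have hentry : PySem.Set.add
            (done.filter (fun n => !(pvBuildPM edges).contains n)) node
          = (done ++ [node]).filter (fun n => !(pvBuildPM edges).contains n) := by
        have hnc : PySem.Set.contains
            (done.filter (fun n => !(pvBuildPM edges).contains n)) node = false := by
          apply Bool.eq_false_iff.mpr
          intro hct
          exact hnode_done (List.mem_of_mem_filter ((PySem.Set.contains_iff _ _).mp hct))
        simp only [PySem.Set.add, hnc]
        simp [List.filter_append, hcont]
      rw [hentry]
      rw [pvLoopA_dd (pvBuildPM edges) (rt.length + fa) _ _ _ _ dd]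
      have hnd2 : ((done ++ [node]) ++ rt ++ nxt).Nodup := by
        have : (done ++ [node]) ++ rt ++ nxt = done ++ (node :: rt) ++ nxt := by
          simp
        rw [this]
        exact hnd
      have key := ih fa (done ++ [node]) nxt dd hnd2
      have e1 : (done ++ [node]) ++ rt ++ nxt = done ++ (node :: rt) ++ nxt := by simp
      have e2 : (done ++ [node]) ++ rt = done ++ (node :: rt) := by simp
      rw [e1, e2] at key
      exact key
    · -- node has parents: A expands them from the parent map, B rescans the edge list
      have hcont : (pvBuildPM edges).contains node = true := by
        rw [pvBuildPM_contains]
        cases hr : pvRaw edges node with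
        | nil => exact absurd hr hraw
        | cons a l => rfl
      have hpsne : ((pvBuildPM edges).getD node PySem.Set.empty).isEmpty = false := by
        rw [pvBuildPM_getD]
        cases hr : pvRaw edges node with
        | nil => exact absurd hr hraw
        | cons a l =>
          simp only [pvFresh]
          rw [if_neg (by simp [PySem.Set.contains])]
          rfl
      have hcondF :
          (!(pvBuildPM edges).contains node
            || ((pvBuildPM edges).getD node PySem.Set.empty).isEmpty) = false := by
        rw [hcont, hpsne]
        rfl
      have hcondF' :
          ¬ (!(pvBuildPM edges).contains node
            || ((pvBuildPM edges).getD node PySem.Set.empty).isEmpty) = true := by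
        rw [hcondF]
        exact Bool.false_ne_true
      rw [if_neg hcondF']
      have hexp := pvExpandGen (fun p => (p, d + 1)) ((pvBuildPM edges).getD node PySem.Set.empty)
        (done ++ (node :: rt) ++ nxt)
        (rt.map (fun n => (n, d)) ++ nxt.map (fun n => (n, d + 1)))
      rw [hexp]
      have hF : pvFresh (done ++ (node :: rt) ++ nxt)
            ((pvBuildPM edges).getD node PySem.Set.empty)
          = pvFresh (done ++ (node :: rt) ++ nxt) (pvRaw edges node) := by
        rw [pvBuildPM_getD]
        exact pvFresh_idem (pvRaw edges node) [] _ (by simp)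
      rw [hF]
      have hscan : pvScanB edges node (done ++ (node :: rt) ++ nxt, nxt)
          = (done ++ (node :: rt) ++ nxt ++ pvFresh (done ++ (node :: rt) ++ nxt) (pvRaw edges node),
             nxt ++ pvFresh (done ++ (node :: rt) ++ nxt) (pvRaw edges node)) := by
        rw [pvScanB_eq]
      rw [hscan]
      set F := pvFresh (done ++ (node :: rt) ++ nxt) (pvRaw edges node) with hFdef
      have hent : (done ++ [node]).filter (fun n => !(pvBuildPM edges).contains n)
          = done.filter (fun n => !(pvBuildPM edges).contains n) := by
        simp [List.filter_append, hcont]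
      have hnd2 : ((done ++ [node]) ++ rt ++ (nxt ++ F)).Nodup := by
        have e1 : (done ++ [node]) ++ rt ++ (nxt ++ F) = (done ++ (node :: rt) ++ nxt) ++ F := by
          simp
        rw [e1]
        refine List.Nodup.append hnd (hFdef ▸ pvFresh_nodup _ _) ?_
        intro a ha hb
        exact (pvFresh_mem _ _ a (hFdef ▸ hb)).2 ha
      have key := ih fa (done ++ [node]) (nxt ++ F) dd hnd2
      have e1 : (done ++ [node]) ++ rt ++ (nxt ++ F) = done ++ (node :: rt) ++ nxt ++ F := by
        simp
      have e2 : (done ++ [node]) ++ rt = done ++ (node :: rt) := by simp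
      have e3 : (nxt ++ F).map (fun n => (n, d + 1))
          = nxt.map (fun n => (n, d + 1)) ++ F.map (fun p => (p, d + 1)) := by
        simp
      rw [e1, e2, e3, hent] at key
      have e4 : rt.map (fun n => (n, d)) ++ nxt.map (fun n => (n, d + 1))
            ++ F.map (fun p => (p, d + 1))
          = rt.map (fun n => (n, d)) ++ (nxt.map (fun n => (n, d + 1))
            ++ F.map (fun p => (p, d + 1))) := by
        simp
      rw [e4]
      exact key

-- the main lockstep: from any level boundary the two loops agree
lemma pvMain (edges : List (Int × Int)) (U : List Int) (hUnd : U.Nodup)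
    (hUedges : ∀ x ∈ edges.map Prod.fst, x ∈ U) :
    ∀ (c : Nat) (fr done : List Int) (fa fb : Nat) (dd : PySem.Dict Int Int) (d : Int),
    (done ++ fr).Nodup → (∀ x ∈ done ++ fr, x ∈ U) →
    c = (U.filter (fun u => !(done ++ fr).contains u)).length →
    fr.length + c ≤ fa → c + 1 ≤ fb →
    pvLoopA (pvBuildPM edges) fa (fr.map (fun n => (n, d))) (done ++ fr)
        (done.filter (fun n => !(pvBuildPM edges).contains n)) dd
    = (pvLoopB2 edges fb fr (done ++ fr)).filter
        (fun n => !(pvBuildPM edges).contains n) := by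
  intro c
  induction c using Nat.strong_induction_on with
  | _ c ih =>
    intro fr done fa fb dd d hnd hmem hc hfa hfb
    cases fr with
    | nil =>
      have hA : pvLoopA (pvBuildPM edges) fa (List.map (fun n => (n, d)) []) (done ++ [])
          (done.filter (fun n => !(pvBuildPM edges).contains n)) dd
          = done.filter (fun n => !(pvBuildPM edges).contains n) := by
        cases fa <;> rfl
      have hB : pvLoopB2 edges fb [] (done ++ []) = done ++ [] := by
        cases fb <;> rfl
      rw [hA, hB]
      simp
    | cons node rt =>
      obtain ⟨fb', rfl⟩ : ∃ fb'', fb = fb'' + 1 := ⟨fb - 1, by omega⟩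
      have hlen1 : (node :: rt).length ≤ fa := by omega
      have hfa2 : fa = (node :: rt).length + (fa - (node :: rt).length) := by omega
      rw [hfa2]
      have hB : pvLoopB2 edges (fb' + 1) (node :: rt) (done ++ (node :: rt))
          = pvLoopB2 edges fb'
              ((node :: rt).foldl (fun st n => pvScanB edges n st)
                (done ++ (node :: rt), [])).2
              ((node :: rt).foldl (fun st n => pvScanB edges n st)
                (done ++ (node :: rt), [])).1 := rfl
      have hlev := pvLevel edges d (node :: rt) (fa - (node :: rt).length) done [] dd
        (by simpa using hnd)
      simp only [List.map_nil, List.append_nil] at hlev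
      rw [pvLevelSt] at hlev
      rw [pvLevelSt] at hB
      simp only [List.nil_append] at hlev hB
      rw [hlev, hB]
      by_cases hDnil : pvDelta edges (node :: rt) (done ++ (node :: rt)) = []
      · rw [hDnil]
        have hA2 : pvLoopA (pvBuildPM edges) (fa - (node :: rt).length)
            (List.map (fun n => (n, d + 1)) []) (done ++ (node :: rt) ++ [])
            ((done ++ (node :: rt)).filter (fun n => !(pvBuildPM edges).contains n)) dd
            = (done ++ (node :: rt)).filter (fun n => !(pvBuildPM edges).contains n) := by
          cases (fa - (node :: rt).length) <;> rfl
        have hB2 : pvLoopB2 edges fb' [] (done ++ (node :: rt) ++ [])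
            = done ++ (node :: rt) ++ [] := by
          cases fb' <;> rfl
        rw [hA2, hB2]
        simp
      · have hΔnd := pvDelta_nodup edges (node :: rt) (done ++ (node :: rt))
        have hΔU : ∀ x ∈ pvDelta edges (node :: rt) (done ++ (node :: rt)), x ∈ U :=
          fun x hx => hUedges x (pvDelta_mem edges _ _ x hx).1
        have hΔvis : ∀ x ∈ pvDelta edges (node :: rt) (done ++ (node :: rt)),
            x ∉ done ++ (node :: rt) :=
          fun x hx => (pvDelta_mem edges _ _ x hx).2
        have hcount := pvCount U hUnd (pvDelta edges (node :: rt) (done ++ (node :: rt)))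
          (done ++ (node :: rt)) hΔnd hΔU hΔvis
        have hΔlen : 1 ≤ (pvDelta edges (node :: rt) (done ++ (node :: rt))).length := by
          cases hcase : pvDelta edges (node :: rt) (done ++ (node :: rt)) with
          | nil => exact absurd hcase hDnil
          | cons a l => simp
        have hc' : (U.filter (fun u =>
            !((done ++ (node :: rt)) ++ pvDelta edges (node :: rt)
              (done ++ (node :: rt))).contains u)).length < c := by
          omega
        have hnd2 : ((done ++ (node :: rt))
            ++ pvDelta edges (node :: rt) (done ++ (node :: rt))).Nodup := by
          refine List.Nodup.append hnd hΔnd ?_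
          intro a ha hb
          exact hΔvis a hb ha
        have hmem2 : ∀ x ∈ (done ++ (node :: rt))
            ++ pvDelta edges (node :: rt) (done ++ (node :: rt)), x ∈ U := by
          intro x hx
          rcases List.mem_append.mp hx with hx | hx
          · exact hmem x hx
          · exact hΔU x hx
        have key := ih _ hc'
          (pvDelta edges (node :: rt) (done ++ (node :: rt)))
          (done ++ (node :: rt))
          (fa - (node :: rt).length) fb' dd (d + 1)
          hnd2 hmem2 rfl (by omega) (by omega)
        exact key

-- A's parent map holds a key exactly for the targets of edges
lemma pvContains_targets (edges : List (Int × Int)) (n : Int) :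
    (pvBuildPM edges).contains n
    = PySem.Set.contains (PySem.Set.ofList (edges.map Prod.snd)) n := by
  rw [pvBuildPM_contains]
  by_cases hn : n ∈ edges.map Prod.snd
  · have hr : PySem.Set.contains (PySem.Set.ofList (edges.map Prod.snd)) n = true :=
      (PySem.Set.contains_iff _ _).mpr ((PySem.Set.mem_ofList _ _).mpr hn)
    rw [hr]
    obtain ⟨e, he, rfl⟩ := List.mem_map.mp hn
    have hmem : e.1 ∈ pvRaw edges e.2 :=
      List.mem_map.mpr ⟨e, List.mem_filter.mpr ⟨he, by simp⟩, rfl⟩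
    cases hcase : pvRaw edges e.2 with
    | nil => rw [hcase] at hmem; simp at hmem
    | cons a l => rfl
  · have hr : PySem.Set.contains (PySem.Set.ofList (edges.map Prod.snd)) n = false := by
      apply Bool.eq_false_iff.mpr
      intro hct
      exact hn ((PySem.Set.mem_ofList _ _).mp ((PySem.Set.contains_iff _ _).mp hct))
    rw [hr]
    have hraw : pvRaw edges n = [] := by
      have hno : ∀ e ∈ edges, ¬ (e.2 == n) = true := by
        intro e he hbe
        exact hn (List.mem_map.mpr ⟨e, he, by simpa using hbe⟩)
      simp only [pvRaw]
      rw [List.filter_eq_nil_iff.mpr (by intro e he; simpa using hno e he)]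
      rfl
    rw [hraw]
    rfl

-- ===== VERDICT (by name: the statement is the Claim_ definition above) =====
theorem find_entry_nodes_spec : Claim_equal_find_entry_nodes := by
  intro edges alarm _
  unfold Spec_find_entry_nodes find_entry_nodes find_entry_nodes_alt
  set U := PySem.Set.ofList (alarm :: edges.map Prod.fst) with hUdef
  have hUnd : U.Nodup := PySem.Set.nodup_ofList _
  have halarm : alarm ∈ U := by
    rw [hUdef]
    exact (PySem.Set.mem_ofList _ _).mpr (by simp)
  have hUedges : ∀ x ∈ edges.map Prod.fst, x ∈ U := by
    intro x hx
    rw [hUdef]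
    exact (PySem.Set.mem_ofList _ _).mpr (List.mem_cons_of_mem _ hx)
  have hUlen : U.length ≤ edges.length + 1 := by
    have h1 := PySem.Set.length_ofList_le (alarm :: edges.map Prod.fst)
    rw [← hUdef] at h1
    simpa using h1
  have e1 : U.filter (fun u => !(([] : List Int) ++ [alarm]).contains u)
      = U.filter (fun u => !(u == alarm)) := by
    apply List.filter_congr
    intro x _
    rw [Bool.eq_iff_iff]
    simp
  have hc0 : (U.filter (fun u => !(([] : List Int) ++ [alarm]).contains u)).length + 1
      = U.length := by
    rw [e1]
    exact pvFilterNeLen U alarm hUnd halarm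
  have h := pvMain edges U hUnd hUedges
    ((U.filter (fun u => !(([] : List Int) ++ [alarm]).contains u)).length)
    [alarm] [] (2 * edges.length + 1) (edges.length + 2) PySem.Dict.empty 0
    (by simp) (by intro x hx; simp only [List.nil_append, List.mem_singleton] at hx; subst hx; exact halarm)
    rfl
    (by simp only [List.length_cons, List.length_nil]; omega)
    (by omega)
  simp only [List.nil_append] at h
  have hfilt : (pvLoopB2 edges (edges.length + 2) [alarm] [alarm]).filter
        (fun n => !(pvBuildPM edges).contains n)
      = (pvLoopB2 edges (edges.length + 2) [alarm] [alarm]).filter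
        (fun n => !PySem.Set.contains (PySem.Set.ofList (edges.map Prod.snd)) n) := by
    apply List.filter_congr
    intro n _
    rw [pvContains_targets]
  rw [hfilt] at h
  exact h
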